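-- pv_equiv track=rewrite | github.com/joshutt/marchmadnessodds | simulateOdds.py | makeGames
-- ===== SOURCE A (Python) =====
-- def makeGames(winners) :
--     games = []
--     team1 = None
--     team2 = None
--     for t in winners :
--         if team1 is None :
--             team1 = t
--         else :
--             team2 = t
--             games.append((team1, team2))
--             team1 = None
--             team2 = None
--     return games
-- ===== SOURCE B (Python) =====
-- def makeGames(winners):
--     return list(zip(winners[0::2], winners[1::2]))
-- ===== Notes on version B (the rewrite author's own statement) =====
-- stated objective: idiomatic
-- what changed: Replaces A's stateful single pass (team1/team2 toggle variables with append) by a stateless split-then-pair decomposition: slice out the even-indexed and odd-indexed elements and zip the two slices, zip's stop-at-shorter rule dropping a trailing unpaired winner.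
import Mathlib
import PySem

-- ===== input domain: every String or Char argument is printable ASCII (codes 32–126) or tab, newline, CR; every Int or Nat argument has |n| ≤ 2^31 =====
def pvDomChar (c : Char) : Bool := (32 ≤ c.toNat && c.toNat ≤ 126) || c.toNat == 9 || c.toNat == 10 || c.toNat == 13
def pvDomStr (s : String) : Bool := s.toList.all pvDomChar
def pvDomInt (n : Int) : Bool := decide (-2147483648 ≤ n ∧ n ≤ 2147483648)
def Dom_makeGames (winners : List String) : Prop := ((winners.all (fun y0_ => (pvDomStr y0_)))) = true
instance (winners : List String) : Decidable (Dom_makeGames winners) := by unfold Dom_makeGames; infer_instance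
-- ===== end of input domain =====

-- B replaces A's stateful toggle loop by a stateless split-then-pair decomposition: zip the even-indexed slice with the odd-indexed slice (same O(n) cost).

-- ===== PORT A =====
-- state: (games, team1, team2), exactly A's three variables
def makeGames (winners : List String) : List (String × String) :=
  (winners.foldl
    (fun (st : List (String × String) × Option String × Option String) t =>
      match st.2.1 with
      | none => (st.1, some t, st.2.2)
      | some team1 =>
        -- team2 = t; games.append((team1, team2)); team1 = None; team2 = None
        (st.1 ++ [(team1, t)], none, none))
    ([], none, none)).1

-- ===== PORT B =====
-- list(zip(winners[0::2], winners[1::2])); step 2 ≠ 0 so both slices are `some`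
-- (the `_, _ => []` branch is an unreachable totality guard)
def makeGames_alt (winners : List String) : List (String × String) :=
  match PySem.List.slice? winners (some 0) none 2, PySem.List.slice? winners (some 1) none 2 with
  | some evens, some odds => evens.zip odds
  | _, _ => []

-- ===== PRECONDITION & SPEC =====
def Spec_makeGames (winners : List String) (out : List (String × String)) : Prop := out = makeGames_alt winners
instance (winners : List String) (out : List (String × String)) : Decidable (Spec_makeGames winners out) := by unfold Spec_makeGames; infer_instance

-- ===== CLAIM (what is proved, stated in full; the proofs are below) =====
def Claim_equal_makeGames : Prop := ∀ (winners : List String), Dom_makeGames winners → Spec_makeGames winners (makeGames winners)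

-- ===== LEMMAS AND PROOFS =====

-- even-indexed elements / odd-indexed elements / consecutive pairs, by two-step structural recursion
def evensL (xs : List String) : List String :=
  match xs with
  | [] => []
  | [a] => [a]
  | a :: _ :: t => a :: evensL t

def oddsL (xs : List String) : List String :=
  match xs with
  | [] => []
  | [_] => []
  | _ :: b :: t => b :: oddsL t

def pairsL (xs : List String) : List (String × String) :=
  match xs with
  | a :: b :: t => (a, b) :: pairsL t
  | _ => []

lemma keyE (xs : List String) :
    List.filterMap (fun k => xs[2*k]?) (List.range ((xs.length+1)/2)) = evensL xs := by
  induction xs using evensL.induct with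
  | case1 => simp [evensL]
  | case2 a => simp [evensL, List.range_succ]
  | case3 a b t ih =>
      have hc : ((a :: b :: t).length + 1) / 2 = (t.length + 1) / 2 + 1 := by
        simp only [List.length_cons]; omega
      have hf : ((fun k => (a :: b :: t)[2*k]?) ∘ Nat.succ) = fun k => t[2*k]? := by
        funext k
        have h2 : 2 * Nat.succ k = 2*k + 1 + 1 := by omega
        simp [Function.comp, h2]
      rw [hc, List.range_succ_eq_map, List.filterMap_cons, List.filterMap_map, hf, ih]
      rfl

lemma keyO (xs : List String) :
    List.filterMap (fun k => xs[2*k+1]?) (List.range (xs.length/2)) = oddsL xs := by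
  induction xs using oddsL.induct with
  | case1 => simp [oddsL]
  | case2 a => simp [oddsL]
  | case3 a b t ih =>
      have hc : (a :: b :: t).length / 2 = t.length / 2 + 1 := by
        simp only [List.length_cons]; omega
      have hf : ((fun k => (a :: b :: t)[2*k+1]?) ∘ Nat.succ) = fun k => t[2*k+1]? := by
        funext k
        have h2 : 2 * Nat.succ k + 1 = 2*k + 1 + 1 + 1 := by omega
        simp [Function.comp, h2]
      rw [hc, List.range_succ_eq_map, List.filterMap_cons, List.filterMap_map, hf, ih]
      rfl

lemma sliceE (xs : List String) : PySem.List.slice? xs (some 0) none 2 = some (evensL xs) := by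
  simp only [PySem.List.slice?, PySem.List.sliceIndices]
  norm_num
  have hc : (if 0 < xs.length then (((xs.length : Int) + 2 - 1) / 2).toNat else 0)
      = (xs.length + 1) / 2 := by split_ifs with h <;> omega
  have hf : (fun k : Nat => xs[((2 : Int) * (k : Int)).toNat]?) = fun k => xs[2*k]? := by
    funext k
    have : ((2 : Int) * (k : Int)).toNat = 2 * k := by omega
    rw [this]
  rw [hc, hf, keyE]

lemma sliceO (xs : List String) : PySem.List.slice? xs (some 1) none 2 = some (oddsL xs) := by
  simp only [PySem.List.slice?, PySem.List.sliceIndices]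
  norm_num
  cases xs with
  | nil => simp [oddsL]
  | cons a t =>
      have hm : min 1 ((a :: t).length : Int) = 1 := by
        have h1 : 1 ≤ (a :: t).length := Nat.succ_le_succ (Nat.zero_le _)
        omega
      rw [hm]
      have hc : (if 1 < (a :: t).length then ((((a :: t).length : Int) - 1 + 2 - 1) / 2).toNat else 0)
          = (a :: t).length / 2 := by split_ifs with h <;> omega
      have hf : (fun k : Nat => (a :: t)[((1 : Int) + 2 * (k : Int)).toNat]?) = fun k => (a :: t)[2*k+1]? := by
        funext k
        have : ((1 : Int) + 2 * (k : Int)).toNat = 2 * k + 1 := by omega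
        rw [this]
      rw [hc, hf, keyO]

lemma zip_evens_odds (xs : List String) : (evensL xs).zip (oddsL xs) = pairsL xs := by
  induction xs using pairsL.induct with
  | case1 a b t ih => simp [evensL, oddsL, pairsL, ih]
  | case2 xs h =>
      cases xs with
      | nil => simp [evensL, oddsL, pairsL]
      | cons a t =>
        cases t with
        | nil => simp [evensL, oddsL, pairsL]
        | cons b r => exact absurd rfl (h a b r)

lemma makeGames_foldl (xs : List String) (acc : List (String × String)) :
    (xs.foldl
      (fun (st : List (String × String) × Option String × Option String) t =>
        match st.2.1 with
        | none => (st.1, some t, st.2.2)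
        | some team1 => (st.1 ++ [(team1, t)], none, none))
      (acc, none, none)).1 = acc ++ pairsL xs := by
  induction xs using pairsL.induct generalizing acc with
  | case1 a b rest ih =>
      simp [List.foldl, pairsL, ih]
  | case2 xs h1 =>
      cases xs with
      | nil => simp [pairsL]
      | cons a t =>
        cases t with
        | nil => simp [List.foldl, pairsL]
        | cons b r => exact absurd rfl (h1 a b r)

-- ===== VERDICT (by name: the statement is the Claim_ definition above) =====
theorem makeGames_spec : Claim_equal_makeGames := by
  intro winners _
  unfold Spec_makeGames
  rw [makeGames_alt, sliceE, sliceO]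
  show makeGames winners = (evensL winners).zip (oddsL winners)
  rw [zip_evens_odds]
  unfold makeGames
  simpa using makeGames_foldl winners []
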